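-- pv_equiv track=rewrite | github.com/Jungle-Algorithm-Study/study | Week10/hyeRexx/pgms.12938.최고의집합.py | solution
-- ===== SOURCE A (Python) =====
-- def solution(n, s):
--     if s // n == 0 :
--         return [-1]
--
--     num, left = divmod(s, n)
--     rst = [num] * n
--
--     if left :
--         for i in range(len(rst)) :
--             rst[i] += 1
--             left -= 1
--             if not left :
--                 break
--
--     return sorted(rst)
-- ===== SOURCE B (Python) =====
-- def solution(n, s):
--     if s // n == 0:
--         return [-1]
--     out = []
--     while n > 0:
--         q = s // n
--         out.append(q)
--         s -= q
--         n -= 1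
--     return out
-- ===== Notes on version B (the rewrite author's own statement) =====
-- stated objective: alternative
-- what changed: B replaces A's divmod-split + list replication + increment loop + sort with a single greedy pass: it repeatedly emits s // n (the floor share for the remaining n parts), subtracts it from s and decrements n, producing the sorted answer directly with one division per element and no sort.
import Mathlib
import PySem

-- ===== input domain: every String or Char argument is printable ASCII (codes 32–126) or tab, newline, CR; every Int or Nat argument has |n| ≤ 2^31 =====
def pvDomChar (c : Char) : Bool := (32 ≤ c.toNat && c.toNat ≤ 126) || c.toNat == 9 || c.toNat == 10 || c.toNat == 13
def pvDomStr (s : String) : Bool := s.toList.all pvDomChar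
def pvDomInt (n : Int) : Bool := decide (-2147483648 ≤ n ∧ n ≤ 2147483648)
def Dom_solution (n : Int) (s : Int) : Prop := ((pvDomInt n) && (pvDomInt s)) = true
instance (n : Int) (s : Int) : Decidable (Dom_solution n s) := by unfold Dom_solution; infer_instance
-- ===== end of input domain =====

-- B replaces A's divmod split + replication + increment loop + sort with one greedy pass
-- (each element is s // remaining-parts), emitting the sorted answer directly.

-- ===== PORT A =====
-- the 'for i in range(len(rst)): rst[i] += 1; left -= 1; if not left: break' loop,
-- walking the list front to back, decrementing left, breaking when it hits 0
def aLoop : List Int → Int → List Int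
  | [], _ => []
  | x :: xs, left =>
      if left - 1 = 0 then (x + 1) :: xs
      else (x + 1) :: aLoop xs (left - 1)

def solution (n : Int) (s : Int) : List Int :=
  if PySem.Int.floordiv s n = 0 then [-1]
  else
    let num := PySem.Int.floordiv s n
    let left := PySem.Int.mod s n
    -- [num] * n : empty when n ≤ 0, exactly Python's list repetition
    let rst := List.replicate n.toNat num
    let rst := if left ≠ 0 then aLoop rst left else rst
    PySem.List.sorted rst (fun x => x) false

-- ===== PORT B =====
-- the 'while n > 0: q = s // n; out.append(q); s -= q; n -= 1' loop, on the Nat n.toNat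
def bLoop : Nat → Int → List Int
  | 0, _ => []
  | k + 1, s =>
      let q := PySem.Int.floordiv s ((k : Int) + 1)
      q :: bLoop k (s - q)

def solution_alt (n : Int) (s : Int) : List Int :=
  if PySem.Int.floordiv s n = 0 then [-1]
  else bLoop n.toNat s

-- ===== PRECONDITION & SPEC =====
-- A raises ZeroDivisionError iff n = 0; it returns on every other input.
def Pre_solution (n : Int) (_s : Int) : Prop := n ≠ 0
instance (n : Int) (s : Int) : Decidable (Pre_solution n s) := by unfold Pre_solution; infer_instance
def pvWitness_solution : Int × Int := (2, 7)

def Spec_solution (n : Int) (s : Int) (out : List Int) : Prop := out = solution_alt n s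
instance (n : Int) (s : Int) (out : List Int) : Decidable (Spec_solution n s out) := by unfold Spec_solution; infer_instance

-- ===== CLAIM (what is proved, stated in full; the proofs are below) =====
def Claim_equal_solution : Prop := ∀ (n : Int) (s : Int), Dom_solution n s → Pre_solution n s → Spec_solution n s (solution n s)

-- ===== LEMMAS AND PROOFS =====

-- A's loop on [num]*k with counter 0 < l ≤ k increments exactly the first l elements
lemma aLoop_replicate (l : Nat) : ∀ (k : Nat) (num : Int), 0 < l → l ≤ k →
    aLoop (List.replicate k num) (l : Int) =
      List.replicate l (num + 1) ++ List.replicate (k - l) num := by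
  induction l with
  | zero => intro k num h; omega
  | succ m ih =>
    intro k num _ hk
    obtain ⟨k', rfl⟩ : ∃ k', k = k' + 1 := ⟨k - 1, by omega⟩
    rcases Nat.eq_zero_or_pos m with hm | hm
    · subst hm
      simp [aLoop, List.replicate_succ]
    · simp only [List.replicate_succ, aLoop]
      push_cast
      rw [if_neg (by omega)]
      have := ih k' num hm (by omega)
      rw [show (m : Int) + 1 - 1 = (m : Int) by ring, this]
      simp

lemma floordiv_mul_add (q r b : Int) (hb : 0 < b) (h0 : 0 ≤ r) (hr : r < b) :
    PySem.Int.floordiv (q * b + r) b = q := by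
  rw [PySem.Int.floordiv_eq_iff_of_pos hb]
  have : (q + 1) * b = q * b + b := by ring
  constructor <;> linarith

-- B's greedy loop on q*(k+1)+r with 0 ≤ r ≤ k yields the sorted replicate form
lemma bLoop_eq (k : Nat) : ∀ (q r : Int), 0 ≤ r → r ≤ (k : Int) →
    bLoop (k + 1) (q * ((k : Int) + 1) + r) =
      List.replicate (k + 1 - r.toNat) q ++ List.replicate r.toNat (q + 1) := by
  induction k with
  | zero =>
    intro q r h0 hr
    have : r = 0 := le_antisymm (by exact_mod_cast hr) h0
    subst this
    simp [bLoop]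
  | succ k ih =>
    intro q r h0 hr
    have hb : (0 : Int) < (k : Int) + 1 + 1 := by positivity
    have hq : PySem.Int.floordiv (q * ((k : Int) + 1 + 1) + r) ((k : Int) + 1 + 1) = q :=
      floordiv_mul_add q r _ hb h0 (by push_cast at hr ⊢; omega)
    show (PySem.Int.floordiv (q * (↑k + 1 + 1) + r) (↑k + 1 + 1)) ::
        bLoop (k + 1) (q * (↑k + 1 + 1) + r - PySem.Int.floordiv (q * (↑k + 1 + 1) + r) (↑k + 1 + 1)) = _
    rw [hq]
    by_cases hrk : r ≤ (k : Int)
    · have harg : q * ((k : Int) + 1 + 1) + r - q = q * ((k : Int) + 1) + r := by ring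
      rw [harg, ih q r h0 hrk]
      have h1 : r.toNat ≤ k := by omega
      rw [show k + 1 + 1 - r.toNat = (k + 1 - r.toNat) + 1 from by omega]
      simp [List.replicate_succ]
    · have hre : r = (k : Int) + 1 := by push_cast at hr; omega
      have harg : q * ((k : Int) + 1 + 1) + r - q = (q + 1) * ((k : Int) + 1) + 0 := by
        rw [hre]; ring
      rw [harg, ih (q + 1) 0 le_rfl (by positivity)]
      have : r.toNat = k + 1 := by omega
      rw [this]
      simp [List.replicate_succ]
-- A equals the replicate normal form for n > 0 (as in the sorted-output argument)
lemma solution_norm (n : Int) (s : Int) (hpos : 0 < n)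
    (h0 : PySem.Int.floordiv s n ≠ 0) :
    solution n s = List.replicate (n.toNat - (PySem.Int.mod s n).toNat) (PySem.Int.floordiv s n)
      ++ List.replicate (PySem.Int.mod s n).toNat (PySem.Int.floordiv s n + 1) := by
  simp only [solution, if_neg h0]
  set num := PySem.Int.floordiv s n with hnum
  set left := PySem.Int.mod s n with hleft
  have hge : 0 ≤ left := PySem.Int.mod_nonneg (a := s) hpos
  have hlt : left < n := PySem.Int.mod_lt (a := s) hpos
  by_cases hl : left = 0
  · rw [if_neg (by simp [hl])]
    rw [hl]
    simp only [Int.toNat_zero, List.replicate_zero, List.append_nil, Nat.sub_zero]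
    exact PySem.List.sorted_eq_self_of_pairwise _ _
      (List.pairwise_replicate.mpr (Or.inr le_rfl))
  · rw [if_pos hl]
    have hcast : (left.toNat : Int) = left := Int.toNat_of_nonneg hge
    have hloop := aLoop_replicate left.toNat n.toNat num (by omega) (by omega)
    rw [hcast] at hloop
    rw [hloop]
    apply PySem.List.sorted_id_eq_of_perm_of_pairwise _ _
    · exact List.perm_append_comm
    · rw [List.pairwise_append]
      refine ⟨List.pairwise_replicate.mpr (by simp),
              List.pairwise_replicate.mpr (by simp), ?_⟩
      intro a ha b hb
      rw [List.eq_of_mem_replicate ha, List.eq_of_mem_replicate hb]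
      omega

theorem solution_spec_aux (n : Int) (s : Int) (hn : n ≠ 0) :
    solution n s = solution_alt n s := by
  by_cases h0 : PySem.Int.floordiv s n = 0
  · simp [solution, solution_alt, h0]
  · rcases lt_or_gt_of_ne hn with hneg | hpos
    · -- n < 0 : both produce the empty list
      have hb := PySem.Int.mod_neg_bounds (a := s) (b := n) hneg
      have h1 : n.toNat = 0 := by omega
      simp only [solution, solution_alt, if_neg h0, h1]
      by_cases hl : PySem.Int.mod s n = 0
      · simp [hl, bLoop, PySem.List.sorted]
      · simp [hl, bLoop, aLoop, PySem.List.sorted]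
    · -- n > 0
      rw [solution_norm n s hpos h0]
      simp only [solution_alt, if_neg h0]
      set num := PySem.Int.floordiv s n with hnum
      set left := PySem.Int.mod s n with hleft
      have hge : 0 ≤ left := PySem.Int.mod_nonneg (a := s) hpos
      have hlt : left < n := PySem.Int.mod_lt (a := s) hpos
      obtain ⟨k, hk⟩ : ∃ k, n.toNat = k + 1 := ⟨n.toNat - 1, by omega⟩
      have hkn : ((k : Int) + 1) = n := by
        have := Int.toNat_of_nonneg (le_of_lt hpos); omega
      have hs : s = num * ((k : Int) + 1) + left := by
        rw [hkn, hnum, hleft]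
        have := PySem.Int.floordiv_mul_add_mod s n
        linarith
      rw [hk, hs, bLoop_eq k num left hge (by omega)]
  -- = by omega : left ≤ k since left < n = k+1

-- ===== VERDICT (by name: the statement is the Claim_ definition above) =====
theorem solution_spec : Claim_equal_solution := by
  intro n s _ hpre
  unfold Spec_solution
  exact solution_spec_aux n s hpre
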